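-- pv_equiv track=rewrite | github.com/syedamaann/LearningLog | 02_pretrainingLLMs/train.py | paragraph_length_filter
-- ===== SOURCE A (Python) =====
-- import heapq
--
-- def paragraph_length_filter(x):
--     """Returns False iff a page has too few lines or lines are too short."""
--     lines = x['text'].split('\n')
--     if (
--         len(lines) < 3
--         or min(heapq.nlargest(3, [len(line) for line in lines])) < 3
--     ):
--         return False
--     return True
-- ===== SOURCE B (Python) =====
-- def paragraph_length_filter(x):
--     """Returns False iff a page has too few lines or lines are too short."""
--     count = 0
--     for line in x['text'].split('\n'):
--         if len(line) >= 3: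
--             count += 1
--     return count >= 3
-- ===== Notes on version B (the rewrite author's own statement) =====
-- stated objective: simpler
-- what changed: Replaces the heap-based nlargest/min/length-guard test by a single-pass counter: count lines of length >= 3 and compare with 3 (the few-lines guard is subsumed).
import Mathlib
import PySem

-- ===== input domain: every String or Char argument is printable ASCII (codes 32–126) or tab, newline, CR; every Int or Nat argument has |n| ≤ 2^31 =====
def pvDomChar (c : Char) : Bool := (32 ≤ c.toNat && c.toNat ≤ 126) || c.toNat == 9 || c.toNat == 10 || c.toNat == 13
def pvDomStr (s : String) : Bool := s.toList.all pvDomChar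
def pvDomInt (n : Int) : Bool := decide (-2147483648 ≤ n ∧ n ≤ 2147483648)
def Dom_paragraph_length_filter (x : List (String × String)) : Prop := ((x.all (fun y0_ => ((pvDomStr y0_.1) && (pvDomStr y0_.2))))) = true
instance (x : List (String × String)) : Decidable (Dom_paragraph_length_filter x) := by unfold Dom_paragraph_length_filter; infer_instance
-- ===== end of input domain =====

-- B replaces the heap-based "min of the 3 largest line lengths" test by a single-pass
-- count of lines of length >= 3 (simpler; the few-lines guard is subsumed).

-- ===== PORT A =====
-- A: lines = x['text'].split('\n'); False if len(lines) < 3 or min(nlargest(3, lengths)) < 3.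
-- heapq.nlargest(3, lst) on ints = sorted(lst, reverse=True)[:3]; min(list) = running-min loop.
def paragraph_length_filter (x : List (String × String)) : Bool :=
  match (x.find? (fun p => p.1 == "text")).map (·.2) with
  | none => false   -- unreachable inside Pre_: Python raises KeyError here
  | some text =>
    let lines := (PySem.Str.split? text "\n").getD []   -- sep "\n" ≠ "": getD never used
    if lines.length < 3 then false
    else if ((PySem.List.min? ((PySem.List.sorted (lines.map (fun line => PySem.Str.len line)) (fun n => n) true).take 3) (fun y => y)).getD 0) < 3 then false
    else true

-- ===== PORT B =====
-- B: count lines with len(line) >= 3 in one pass, return count >= 3.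
def paragraph_length_filter_alt (x : List (String × String)) : Bool :=
  match (x.find? (fun p => p.1 == "text")).map (·.2) with
  | none => false   -- unreachable inside Pre_: Python raises KeyError here
  | some text =>
    let count := ((PySem.Str.split? text "\n").getD []).foldl
      (fun acc line => if 3 ≤ PySem.Str.len line then acc + 1 else acc) (0 : Int)
    decide (3 ≤ count)

-- ===== PRECONDITION & SPEC =====
-- Pre_ excludes exactly the dicts without a 'text' key, on which Python A raises KeyError.
def Pre_paragraph_length_filter (x : List (String × String)) : Prop :=
  (x.any (fun p => p.1 == "text")) = true
instance (x : List (String × String)) : Decidable (Pre_paragraph_length_filter x) := by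
  unfold Pre_paragraph_length_filter; infer_instance
def pvWitness_paragraph_length_filter : (List (String × String)) := [("text", "abc\ndef\nghi")]

def Spec_paragraph_length_filter (x : List (String × String)) (out : Bool) : Prop := out = paragraph_length_filter_alt x
instance (x : List (String × String)) (out : Bool) : Decidable (Spec_paragraph_length_filter x out) := by unfold Spec_paragraph_length_filter; infer_instance

-- ===== CLAIM (what is proved, stated in full; the proofs are below) =====
def Claim_equal_paragraph_length_filter : Prop := ∀ (x : List (String × String)), Dom_paragraph_length_filter x → Pre_paragraph_length_filter x → Spec_paragraph_length_filter x (paragraph_length_filter x)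

-- ===== LEMMAS AND PROOFS =====

-- B's counting loop is countP of the length test.
theorem count_loop_eq (lines : List String) :
    lines.foldl (fun acc line => if 3 ≤ PySem.Str.len line then acc + 1 else acc) (0 : Int)
      = (lines.countP (fun line => decide (3 ≤ PySem.Str.len line)) : Int) := by
  simpa using PySem.List.foldl_ite_add_one (fun line => 3 ≤ PySem.Str.len line) lines 0

-- the core arithmetic fact on the list of line lengths
theorem a_cond_iff_count (ns : List Int) :
    (if ns.length < 3 then false
     else if ((PySem.List.min? ((PySem.List.sorted ns (fun n => n) true).take 3) (fun y => y)).getD 0) < 3 then false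
     else true)
    = decide (3 ≤ (ns.countP (fun n => decide (3 ≤ n)) : Int)) := by
  have hperm : (PySem.List.sorted ns (fun n => n) true).Perm ns := PySem.List.sorted_perm ns _ _
  have hcount : (PySem.List.sorted ns (fun n => n) true).countP (fun n => decide (3 ≤ n))
      = ns.countP (fun n => decide (3 ≤ n)) := hperm.countP_eq _
  have hlen : (PySem.List.sorted ns (fun n => n) true).length = ns.length := hperm.length_eq
  have hpw : (PySem.List.sorted ns (fun n => n) true).Pairwise (fun a b => b ≤ a) :=
    PySem.List.sorted_pairwise_rev ns _
  by_cases hsmall : ns.length < 3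
  · simp only [hsmall, if_true]
    have hle : ns.countP (fun n => decide (3 ≤ n)) ≤ ns.length := List.countP_le_length
    have : ¬ (3 ≤ (ns.countP (fun n => decide (3 ≤ n)) : Int)) := by omega
    simp [this]
  · simp only [hsmall, if_false]
    obtain ⟨a, b, c, t, hs⟩ : ∃ a b c t, PySem.List.sorted ns (fun n => n) true = a :: b :: c :: t := by
      match h : PySem.List.sorted ns (fun n => n) true with
      | [] => rw [h] at hlen; simp at hlen; omega
      | [a] => rw [h] at hlen; simp at hlen; omega
      | [a, b] => rw [h] at hlen; simp at hlen; omega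
      | a :: b :: c :: t => exact ⟨a, b, c, t, rfl⟩
    rw [hs] at hcount hpw
    rw [List.pairwise_cons] at hpw
    obtain ⟨ha, hpw⟩ := hpw
    rw [List.pairwise_cons] at hpw
    obtain ⟨hb, hpw⟩ := hpw
    rw [List.pairwise_cons] at hpw
    obtain ⟨ht, _⟩ := hpw
    have hba : b ≤ a := ha b (by simp)
    have hcb : c ≤ b := hb c (by simp)
    have htake : (a :: b :: c :: t).take 3 = [a, b, c] := by simp
    rw [hs, htake, PySem.List.min?_id_cons]
    have hmin : [b, c].foldl min a = c := by
      simp only [List.foldl]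
      omega
    rw [hmin, Option.getD_some, ← hcount]
    by_cases h3c : (3 : Int) ≤ c
    · have h3b : (3 : Int) ≤ b := le_trans h3c hcb
      have h3a : (3 : Int) ≤ a := le_trans h3b hba
      have hnc : ¬ (c < 3) := by omega
      simp only [hnc, if_false]
      have h3 : 3 ≤ ((a :: b :: c :: t).countP (fun n => decide (3 ≤ n)) : Int) := by
        simp only [List.countP_cons, decide_eq_true_eq]
        simp [h3a, h3b, h3c]
        omega
      simp [h3]
    · have hc3 : c < 3 := by omega
      simp only [hc3, if_true]
      have htz : t.countP (fun n => decide (3 ≤ n)) = 0 := by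
        rw [List.countP_eq_zero]
        intro y hy
        have := ht y hy
        simp
        omega
      have hle2 : ((a :: b :: c :: t).countP (fun n => decide (3 ≤ n)) : Int) < 3 := by
        simp only [List.countP_cons, htz, decide_eq_true_eq]
        have : ¬ (3 ≤ c) := by omega
        simp [this]
        split_ifs <;> omega
      have : ¬ (3 ≤ (((a :: b :: c :: t).countP (fun n => decide (3 ≤ n))) : Int)) := by omega
      simp [this]

-- ===== VERDICT (by name: the statement is the Claim_ definition above) =====
theorem paragraph_length_filter_spec : Claim_equal_paragraph_length_filter := by
  intro x _ _
  unfold Spec_paragraph_length_filter paragraph_length_filter paragraph_length_filter_alt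
  cases h : (x.find? (fun p => p.1 == "text")).map (·.2) with
  | none => rfl
  | some text =>
    simp only
    rw [count_loop_eq]
    set lines := (PySem.Str.split? text "\n").getD [] with hl
    have h2 := a_cond_iff_count (lines.map (fun line => PySem.Str.len line))
    simp only [List.countP_map, List.length_map, Function.comp_def] at h2
    exact h2
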